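-- pv_equiv track=rewrite | github.com/swidoff/codewars-python | bloxorz_solver.py | blox_solver
-- ===== SOURCE A (Python) =====
-- from collections import deque
-- from typing import Tuple
--
-- Pos = Tuple[Tuple[int, int], ...]
--
-- def move_pos(pos: Pos, move: str) -> Pos:
--     if len(pos) == 1:  # Upright
--         r, c = pos[0]
--         if move == "U":
--             new_pos = tuple((r - i, c) for i in range(2, 0, -1))
--         elif move == "D":
--             new_pos = tuple((r + i, c) for i in range(1, 3))
--         elif move == "L":
--             new_pos = tuple((r, c - i) for i in range(2, 0, -1))
--         else:
--             new_pos = tuple((r, c + i) for i in range(1, 3))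
--     elif pos[0][0] == pos[1][0]:  # Horizontal
--         if move == "U":
--             new_pos = tuple((r - 1, c) for r, c in pos)
--         elif move == "D":
--             new_pos = tuple((r + 1, c) for r, c in pos)
--         elif move == "L":
--             new_pos = ((pos[0][0], pos[0][1] - 1),)
--         else:
--             new_pos = ((pos[0][0], pos[1][1] + 1),)
--     else:  # Vertical
--         assert pos[0][1] == pos[1][1]
--         if move == "U":
--             new_pos = ((pos[0][0] - 1, pos[0][1]),)
--         elif move == "D":
--             new_pos = ((pos[1][0] + 1, pos[0][1]),)
--         elif move == "L":
--             new_pos = tuple((r, c - 1) for r, c in pos)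
--         else:
--             new_pos = tuple((r, c + 1) for r, c in pos)
--
--     return new_pos
--
-- def blox_solver(ar):
--     floor = set()
--     start = None
--     goal = None
--
--     for r in range(len(ar)):
--         for c in range(len(ar[r])):
--             char = ar[r][c]
--             if char != '0':
--                 floor.add((r, c))
--             if char == 'B':
--                 start = ((r, c),)
--             elif char == 'X':
--                 goal = ((r, c),)
--
--     res = None
--     seen = set()
--     q = deque([(start, "")])
--     while q:
--         pos, moves = q.popleft()
--         if pos == goal:
--             res = moves
--             break
--         else:
--             seen.add(pos)
--             if all(p in floor for p in pos):
--                 for move in "RDLU":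
--                     new_pos = move_pos(pos, move)
--                     if new_pos not in seen:
--                         q.append((new_pos, moves + move))
--
--     return res
-- ===== SOURCE B (Python) =====
-- from collections import deque
-- from typing import Tuple
--
-- Pos = Tuple[Tuple[int, int], ...]
--
-- def move_pos(pos: Pos, move: str) -> Pos:
--     if len(pos) == 1:  # Upright
--         r, c = pos[0]
--         if move == "U":
--             new_pos = tuple((r - i, c) for i in range(2, 0, -1))
--         elif move == "D":
--             new_pos = tuple((r + i, c) for i in range(1, 3))
--         elif move == "L":
--             new_pos = tuple((r, c - i) for i in range(2, 0, -1))
--         else: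
--             new_pos = tuple((r, c + i) for i in range(1, 3))
--     elif pos[0][0] == pos[1][0]:  # Horizontal
--         if move == "U":
--             new_pos = tuple((r - 1, c) for r, c in pos)
--         elif move == "D":
--             new_pos = tuple((r + 1, c) for r, c in pos)
--         elif move == "L":
--             new_pos = ((pos[0][0], pos[0][1] - 1),)
--         else:
--             new_pos = ((pos[0][0], pos[1][1] + 1),)
--     else:  # Vertical
--         assert pos[0][1] == pos[1][1]
--         if move == "U":
--             new_pos = ((pos[0][0] - 1, pos[0][1]),)
--         elif move == "D":
--             new_pos = ((pos[1][0] + 1, pos[0][1]),)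
--         elif move == "L":
--             new_pos = tuple((r, c - 1) for r, c in pos)
--         else:
--             new_pos = tuple((r, c + 1) for r, c in pos)
--
--     return new_pos
--
-- def blox_solver(ar):
--     floor = set()
--     start = None
--     goal = None
--
--     for r in range(len(ar)):
--         for c in range(len(ar[r])):
--             char = ar[r][c]
--             if char != '0':
--                 floor.add((r, c))
--             if char == 'B':
--                 start = ((r, c),)
--             elif char == 'X':
--                 goal = ((r, c),)
--
--     # BFS keeping only positions in the queue; paths are reconstructed afterwards
--     # from a predecessor table recorded at each state's first enqueue.
--     seen = set()
--     pred = {}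
--     q = deque([start])
--     while q:
--         pos = q.popleft()
--         if pos == goal:
--             moves = []
--             cur = pos
--             while cur in pred:
--                 cur, mv = pred[cur]
--                 moves.append(mv)
--             return "".join(reversed(moves))
--         seen.add(pos)
--         if all(p in floor for p in pos):
--             for move in "RDLU":
--                 new_pos = move_pos(pos, move)
--                 if new_pos not in seen:
--                     q.append(new_pos)
--                     if new_pos not in pred:
--                         pred[new_pos] = (pos, move)
--     return None
-- ===== Notes on version B (the rewrite author's own statement) =====
-- stated objective: alternative
-- what changed: B's BFS queue holds bare block states instead of (state, accumulated-path-string) pairs: a predecessor table (state -> (previous state, move)) is recorded at each state's first enqueue and the answer string is reconstructed backwards from the goal only after it is dequeued.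
import Mathlib
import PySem

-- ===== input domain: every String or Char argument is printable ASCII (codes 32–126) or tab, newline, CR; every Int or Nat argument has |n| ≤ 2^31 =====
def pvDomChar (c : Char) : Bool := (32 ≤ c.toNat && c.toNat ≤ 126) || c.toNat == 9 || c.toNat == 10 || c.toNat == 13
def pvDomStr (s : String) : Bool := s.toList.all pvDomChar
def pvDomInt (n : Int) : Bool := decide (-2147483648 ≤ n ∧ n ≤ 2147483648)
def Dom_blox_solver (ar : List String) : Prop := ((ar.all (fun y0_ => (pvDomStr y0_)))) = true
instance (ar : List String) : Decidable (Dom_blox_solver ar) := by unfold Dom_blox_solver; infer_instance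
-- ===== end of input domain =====

-- B replaces A's queue of (state, path-string) pairs by a queue of states plus a predecessor
-- table recorded at each state's first enqueue, reconstructing the move string backwards only
-- once the goal is dequeued (objective: alternative decomposition, same BFS cost).

-- ===== PORT A =====
-- move_pos is the identical helper in Source A and Source B; both ports call this one definition.
def movePos (pos : List (Int × Int)) (move : String) : List (Int × Int) :=
  match pos with
  | [(r, c)] =>  -- Upright
      if move = "U" then [(r - 2, c), (r - 1, c)]
      else if move = "D" then [(r + 1, c), (r + 2, c)]
      else if move = "L" then [(r, c - 2), (r, c - 1)]
      else [(r, c + 1), (r, c + 2)]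
  | (r1, c1) :: (r2, c2) :: _ =>
      if r1 = r2 then  -- Horizontal
        if move = "U" then [(r1 - 1, c1), (r2 - 1, c2)]
        else if move = "D" then [(r1 + 1, c1), (r2 + 1, c2)]
        else if move = "L" then [(r1, c1 - 1)]
        else [(r1, c2 + 1)]
      else  -- Vertical
        if move = "U" then [(r1 - 1, c1)]
        else if move = "D" then [(r2 + 1, c1)]
        else if move = "L" then [(r1, c1 - 1), (r2, c2 - 1)]
        else [(r1, c1 + 1), (r2, c2 + 1)]
  | [] => []  -- unreachable guard: Python never calls move_pos with an empty tuple

-- the grid scan (floor / start / goal) is the identical preamble loop in Source A and Source B;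
-- both ports call this one definition (for r / for c over in-range indices = enumerate).
def scanGrid (ar : List String) :
    PySem.Set (Int × Int) × Option (List (Int × Int)) × Option (List (Int × Int)) :=
  (PySem.List.enumerate ar 0).foldl
    (fun st rc =>
      (PySem.List.enumerate rc.2.toList 0).foldl
        (fun st2 cc =>
          let fl := if cc.2 ≠ '0' then PySem.Set.add st2.1 (rc.1, cc.1) else st2.1
          if cc.2 = 'B' then (fl, some [(rc.1, cc.1)], st2.2.2)
          else if cc.2 = 'X' then (fl, st2.2.1, some [(rc.1, cc.1)])
          else (fl, st2.2.1, st2.2.2))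
        st)
    (PySem.Set.empty, none, none)

-- fuel totalizing the two while-loops (both terminate in Python): the number of dequeues is
-- bounded by the items of a 4-ary forest whose chains visit pairwise-distinct block
-- positions, all inside the grid box, hence ≤ 4^(states+2).
def bloxFuel (ar : List String) : Nat :=
  let s := 3 * (ar.length + 5) * ((ar.map (fun t => t.toList.length)).foldl (· + ·) 0 + 5)
  4 ^ (s + 2) + 5

def loopA (goal : Option (List (Int × Int))) (floor : PySem.Set (Int × Int)) :
    Nat → List ((List (Int × Int)) × String) → PySem.Set (List (Int × Int)) → Option String
  | 0, _, _ => none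
  | _ + 1, [], _ => none
  | fuel + 1, (pos, moves) :: rest, seen =>
    if some pos = goal then some moves
    else
      let seen' := PySem.Set.add seen pos
      if pos.all (fun p => PySem.Set.contains floor p) then
        loopA goal floor fuel
          (["R", "D", "L", "U"].foldl
            (fun q mv =>
              if !(PySem.Set.contains seen' (movePos pos mv)) then
                q ++ [(movePos pos mv, moves ++ mv)]
              else q)
            rest)
          seen'
      else
        loopA goal floor fuel rest seen'

def blox_solver (ar : List String) : Option String :=
  let sg := scanGrid ar
  match sg.2.1 with
  | none =>
      -- start is None: Python returns "" when goal is also None (None == None on the first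
      -- dequeue); with a goal present it raises TypeError — excluded by Pre_blox_solver
      if sg.2.2 = none then some "" else none
  | some s => loopA sg.2.2 sg.1 (bloxFuel ar) [(s, "")] PySem.Set.empty

-- ===== PORT B =====
-- backward walk through the predecessor table ("while cur in pred"); the table is acyclic
-- and its chains step to strictly earlier entries, so pred.length is enough fuel
def traceB (pred : List ((List (Int × Int)) × ((List (Int × Int)) × String))) :
    Nat → List (Int × Int) → List String
  | 0, _ => []
  | fuel + 1, cur =>
    match pred.lookup cur with
    | none => []
    | some pm => pm.2 :: traceB pred fuel pm.1

def loopB (goal : Option (List (Int × Int))) (floor : PySem.Set (Int × Int)) :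
    Nat → List (List (Int × Int)) → PySem.Set (List (Int × Int)) →
    List ((List (Int × Int)) × ((List (Int × Int)) × String)) → Option String
  | 0, _, _, _ => none
  | _ + 1, [], _, _ => none
  | fuel + 1, pos :: rest, seen, pred =>
    if some pos = goal then
      some (PySem.Str.join "" ((traceB pred pred.length pos).reverse))
    else
      let seen' := PySem.Set.add seen pos
      if pos.all (fun p => PySem.Set.contains floor p) then
        let st := ["R", "D", "L", "U"].foldl
          (fun st mv =>
            if !(PySem.Set.contains seen' (movePos pos mv)) then
              (st.1 ++ [movePos pos mv],
               if (st.2.lookup (movePos pos mv)).isNone then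
                 st.2 ++ [(movePos pos mv, (pos, mv))]
               else st.2)
            else st)
          (rest, pred)
        loopB goal floor fuel st.1 seen' st.2
      else
        loopB goal floor fuel rest seen' pred

def blox_solver_alt (ar : List String) : Option String :=
  let sg := scanGrid ar
  match sg.2.1 with
  | none => if sg.2.2 = none then some "" else none
  | some s => loopB sg.2.2 sg.1 (bloxFuel ar) [s] PySem.Set.empty []

-- ===== PRECONDITION & SPEC =====
-- Pre_ excludes exactly the grids with no 'B' but an 'X': there start is None and
-- Python A raises TypeError when iterating it (Python B raises the same TypeError).
def Pre_blox_solver (ar : List String) : Prop :=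
  (∃ s ∈ ar, 'B' ∈ s.toList) ∨ (∀ s ∈ ar, 'X' ∉ s.toList)
instance (ar : List String) : Decidable (Pre_blox_solver ar) := by
  unfold Pre_blox_solver; infer_instance
def pvWitness_blox_solver : List String := ["B1X"]

def Spec_blox_solver (ar : List String) (out : Option String) : Prop := out = blox_solver_alt ar
instance (ar : List String) (out : Option String) : Decidable (Spec_blox_solver ar out) := by
  unfold Spec_blox_solver; infer_instance

-- ===== CLAIM (what is proved, stated in full; the proofs are below) =====
def Claim_equal_blox_solver : Prop := ∀ (ar : List String), Dom_blox_solver ar → Pre_blox_solver ar → Spec_blox_solver ar (blox_solver ar)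

-- ===== LEMMAS AND PROOFS =====

abbrev BPos := List (Int × Int)
abbrev BPred := List (BPos × (BPos × String))

def goodPred (start : BPos) (pred : BPred) : Prop :=
  ∀ i (h : i < pred.length), pred[i].2.1 = start ∨ pred[i].2.1 ∈ (pred.take i).map Prod.fst

theorem lookup_eq_none_iff (pred : BPred) (k : BPos) :
    pred.lookup k = none ↔ k ∉ pred.map Prod.fst := by
  induction pred with
  | nil => simp
  | cons e t ih =>
    obtain ⟨a, v⟩ := e
    rw [List.lookup_cons]
    by_cases h : k = a
    · subst h; simp
    · have : (k == a) = false := beq_false_of_ne h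
      simp [this, ih, h, Ne.symm h]

theorem lookup_append_left (pred Δ : BPred) (k : BPos) (h : k ∈ pred.map Prod.fst) :
    (pred ++ Δ).lookup k = pred.lookup k := by
  induction pred with
  | nil => simp at h
  | cons e t ih =>
    rw [List.cons_append, List.lookup_cons, List.lookup_cons]
    cases hb : (k == e.1) with
    | true => simp
    | false =>
      simp only []
      apply ih
      simp only [List.map_cons, List.mem_cons] at h
      rcases h with h | h
      · exact absurd h (by simpa using hb)
      · exact h

theorem lookup_append_right (pred Δ : BPred) (k : BPos) (h : k ∉ pred.map Prod.fst) :
    (pred ++ Δ).lookup k = Δ.lookup k := by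
  induction pred with
  | nil => simp
  | cons e t ih =>
    rw [List.cons_append, List.lookup_cons]
    have : (k == e.1) = false := by
      apply beq_false_of_ne; intro hk; apply h; simp [hk]
    simp only [this]
    exact ih (by intro hm; exact h (by simp at hm ⊢; tauto))

theorem lookup_getElem (pred : BPred) (hnd : (pred.map Prod.fst).Nodup) (i : Nat)
    (e : BPos × (BPos × String)) (h : pred[i]? = some e) : pred.lookup e.1 = some e.2 := by
  induction pred generalizing i with
  | nil => simp at h
  | cons a t ih =>
    rw [List.lookup_cons]
    cases i with
    | zero =>
      simp at h; subst h; simp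
    | succ n =>
      simp only [List.getElem?_cons_succ] at h
      have hmem : e ∈ t := List.mem_of_getElem? h
      have he : e.1 ∈ t.map Prod.fst := List.mem_map_of_mem hmem
      simp only [List.map_cons, List.nodup_cons] at hnd
      have hne : (e.1 == a.1) = false := by
        apply beq_false_of_ne; intro hk
        exact hnd.1 (hk ▸ he)
      simp only [hne]
      exact ih hnd.2 n h

theorem lookup_mem (pred : BPred) (k : BPos) (v : BPos × String) (h : pred.lookup k = some v) :
    (k, v) ∈ pred := by
  induction pred with
  | nil => simp at h
  | cons e t ih =>
    rw [List.lookup_cons] at h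
    cases hb : (k == e.1) with
    | true =>
      rw [hb] at h
      simp only [Option.some.injEq] at h
      have hk : k = e.1 := by exact eq_of_beq hb
      rw [hk, ← h]
      exact List.mem_cons_self
    | false =>
      rw [hb] at h
      exact List.mem_cons_of_mem _ (ih h)

theorem traceB_nonkey (pred : BPred) (k : BPos) (h : k ∉ pred.map Prod.fst) (f : Nat) :
    traceB pred f k = [] := by
  cases f with
  | zero => rfl
  | succ n => unfold traceB; rw [(lookup_eq_none_iff pred k).mpr h]

theorem traceB_fuel_ge (pred : BPred) (start : BPos)
    (hnd : (pred.map Prod.fst).Nodup) (hg : goodPred start pred)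
    (hs : start ∉ pred.map Prod.fst) :
    ∀ i, ∀ _ : i < pred.length, ∀ f g : Nat, i < f → i < g →
      traceB pred f (pred[i].1) = traceB pred g (pred[i].1) := by
  intro i
  induction i using Nat.strong_induction_on with
  | h i ih =>
    intro hi f g hf hgg
    obtain ⟨f', rfl⟩ : ∃ f', f = f' + 1 := ⟨f - 1, by omega⟩
    obtain ⟨g', rfl⟩ : ∃ g', g = g' + 1 := ⟨g - 1, by omega⟩
    have hlk : pred.lookup (pred[i].1) = some (pred[i].2) :=
      lookup_getElem pred hnd i pred[i] (List.getElem?_eq_getElem hi)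
    show traceB pred (f' + 1) _ = traceB pred (g' + 1) _
    unfold traceB
    rw [hlk]
    simp only []
    rcases hg i hi with hst | htk
    · rw [hst, traceB_nonkey pred start hs f', traceB_nonkey pred start hs g']
    · obtain ⟨e, he, hek⟩ := List.mem_map.mp htk
      obtain ⟨j, hj, hje⟩ := List.mem_iff_getElem.mp he
      have hjlen : j < i := by
        have := hj; simp [List.length_take] at this; omega
      have hji : j < pred.length := by omega
      have : (pred.take i)[j] = pred[j] := List.getElem_take
      rw [this] at hje
      have hk' : pred[i].2.1 = pred[j].1 := by rw [← hek, hje]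
      rw [hk']
      rw [ih j hjlen hji f' g' (by omega) (by omega)]

theorem traceB_ground (pred : BPred) (start k : BPos)
    (hnd : (pred.map Prod.fst).Nodup) (hg : goodPred start pred)
    (hs : start ∉ pred.map Prod.fst) (hk : k = start ∨ k ∈ pred.map Prod.fst)
    (f g : Nat) (hf : pred.length ≤ f) (hgf : pred.length ≤ g) :
    traceB pred f k = traceB pred g k := by
  rcases hk with rfl | hk
  · rw [traceB_nonkey pred k hs, traceB_nonkey pred k hs]
  · obtain ⟨e, he, hek⟩ := List.mem_map.mp hk
    obtain ⟨i, hi, hie⟩ := List.mem_iff_getElem.mp he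
    subst hek; rw [← hie]
    exact traceB_fuel_ge pred start hnd hg hs i hi f g (by omega) (by omega)

theorem traceB_append (pred Δ : BPred) (start : BPos)
    (hfresh : ∀ k ∈ Δ.map Prod.fst, k ∉ pred.map Prod.fst ∧ k ≠ start)
    (hs : start ∉ pred.map Prod.fst) (hg : goodPred start pred) :
    ∀ (f : Nat) (k : BPos), (k = start ∨ k ∈ pred.map Prod.fst) →
      traceB (pred ++ Δ) f k = traceB pred f k := by
  intro f
  induction f with
  | zero => intro k _; rfl
  | succ n ih =>
    intro k hk
    unfold traceB
    rcases hk with rfl | hk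
    · have h1 : (pred ++ Δ).lookup k = none := by
        rw [lookup_eq_none_iff]
        simp only [List.map_append, List.mem_append]
        rintro (h | h)
        · exact hs h
        · exact (hfresh k h).2 rfl
      rw [h1, (lookup_eq_none_iff pred k).mpr hs]
    · rw [lookup_append_left pred Δ k hk]
      cases hlk : pred.lookup k with
      | none => rfl
      | some pm =>
        have hmem := lookup_mem pred k pm hlk
        obtain ⟨i, hi, hie⟩ := List.mem_iff_getElem.mp hmem
        have hpar : pm.1 = start ∨ pm.1 ∈ pred.map Prod.fst := by
          rcases hg i hi with h | h
          · left; rw [← h, hie]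
          · right
            have h2 : pred[i].2.1 ∈ (pred.map Prod.fst).take i := by
              rw [← List.map_take]; exact h
            have h3 := List.mem_of_mem_take h2
            have h4 : pred[i].2.1 = pm.1 := by rw [hie]
            rwa [h4] at h3
        simp only []
        rw [ih pm.1 hpar]

theorem chars_join_snoc (l : List (List Char)) (mv : List Char) :
    PySem.Chars.join [] (l ++ [mv]) = PySem.Chars.join [] l ++ mv := by
  induction l with
  | nil => simp [PySem.Chars.join_nil, PySem.Chars.join_singleton]
  | cons a t ih =>
    cases t with
    | nil => simp [PySem.Chars.join_singleton, PySem.Chars.join_cons_cons]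
    | cons b r =>
      have h1 := PySem.Chars.join_cons_cons [] a b r
      have h2 := PySem.Chars.join_cons_cons [] a b (r ++ [mv])
      simp only [List.cons_append] at *
      rw [h2, ih, h1]; simp

theorem join_snoc (l : List String) (mv : String) :
    PySem.Str.join "" (l ++ [mv]) = PySem.Str.join "" l ++ mv := by
  apply String.ext
  show (PySem.Str.join "" (l ++ [mv])).toList = (PySem.Str.join "" l ++ mv).toList
  rw [String.toList_append, PySem.Str.toList_join, PySem.Str.toList_join]
  simp only [List.map_append, List.map_cons, List.map_nil]
  have h0 : ("" : String).toList = ([] : List Char) := rfl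
  rw [h0, chars_join_snoc]

def TraceStr (pred : BPred) (k : BPos) : String :=
  PySem.Str.join "" ((traceB pred pred.length k).reverse)

theorem TraceStr_extend (pred Δ : BPred) (start k : BPos)
    (hfresh : ∀ x ∈ Δ.map Prod.fst, x ∉ pred.map Prod.fst ∧ x ≠ start)
    (hnd : (pred.map Prod.fst).Nodup) (hg : goodPred start pred)
    (hs : start ∉ pred.map Prod.fst) (hk : k = start ∨ k ∈ pred.map Prod.fst) :
    TraceStr (pred ++ Δ) k = TraceStr pred k := by
  unfold TraceStr
  rw [traceB_append pred Δ start hfresh hs hg _ k hk,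
    traceB_ground pred start k hnd hg hs hk ((pred ++ Δ).length) pred.length
      (by simp) (le_refl _)]

theorem goodPred_snoc (pred : BPred) (start np p : BPos) (mv : String)
    (hg : goodPred start pred) (hp : p = start ∨ p ∈ pred.map Prod.fst) :
    goodPred start (pred ++ [(np, (p, mv))]) := by
  intro i hi
  simp only [List.length_append, List.length_singleton] at hi
  by_cases h : i < pred.length
  · have he : (pred ++ [(np, (p, mv))])[i] = pred[i] := List.getElem_append_left h
    have ht : (pred ++ [(np, (p, mv))]).take i = pred.take i :=
      List.take_append_of_le_length (by omega)
    rw [he, ht]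
    exact hg i h
  · have hieq : i = pred.length := by omega
    subst hieq
    have he : (pred ++ [(np, (p, mv))])[pred.length] = (np, (p, mv)) := by
      rw [List.getElem_append_right (le_refl _)]
      simp
    have ht : (pred ++ [(np, (p, mv))]).take pred.length = pred := by
      rw [List.take_append_of_le_length (le_refl _), List.take_length]
    rw [he, ht]
    exact hp

theorem TraceStr_snoc (pred : BPred) (start np p : BPos) (mv : String)
    (hnp : np ∉ pred.map Prod.fst) (hne : np ≠ start)
    (hnd : (pred.map Prod.fst).Nodup) (hg : goodPred start pred)
    (hs : start ∉ pred.map Prod.fst) (hp : p = start ∨ p ∈ pred.map Prod.fst) :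
    TraceStr (pred ++ [(np, (p, mv))]) np = TraceStr pred p ++ mv := by
  unfold TraceStr
  have hlen : (pred ++ [(np, (p, mv))]).length = pred.length + 1 := by simp
  rw [hlen]
  show PySem.Str.join "" ((traceB (pred ++ [(np, (p, mv))]) (pred.length + 1) np).reverse) = _
  have hlk : (pred ++ [(np, (p, mv))]).lookup np = some (p, mv) := by
    rw [lookup_append_right pred _ np hnp]
    simp [List.lookup_cons]
  have hstep : traceB (pred ++ [(np, (p, mv))]) (pred.length + 1) np
      = mv :: traceB (pred ++ [(np, (p, mv))]) pred.length p := by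
    rw [show traceB (pred ++ [(np, (p, mv))]) (pred.length + 1) np =
      (match (pred ++ [(np, (p, mv))]).lookup np with
        | none => []
        | some pm => pm.2 :: traceB (pred ++ [(np, (p, mv))]) pred.length pm.1) from rfl, hlk]
  rw [hstep]
  rw [traceB_append pred [(np, (p, mv))] start
    (by intro x hx; simp at hx; subst hx; exact ⟨hnp, hne⟩) hs hg pred.length p hp]
  rw [List.reverse_cons, join_snoc]



structure MidInv (start p : BPos) (m : String) (seen seen' : PySem.Set BPos) (pred0 : BPred)
    (qa : List (BPos × String)) (qb : List BPos) (pred : BPred) : Prop where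
  hq : qb = qa.map Prod.fst
  hstart : start ∉ pred.map Prod.fst
  hnd : (pred.map Prod.fst).Nodup
  hgood : goodPred start pred
  hpgr : p = start ∨ p ∈ pred.map Prod.fst
  hqgr : ∀ pm ∈ qa, pm.1 = start ∨ pm.1 ∈ pred.map Prod.fst
  hcov : ∀ k ∈ pred.map Prod.fst, k ∈ seen' ∨ k ∈ qa.map Prod.fst
  htrace : ∀ (i : Nat) (pos : BPos) (moves : String), qa[i]? = some (pos, moves) → pos ∉ seen' →
    (∀ j : Nat, j < i → ∀ e : BPos × String, qa[j]? = some e → e.1 ≠ pos) →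
    TraceStr pred pos = moves
  hm : p ∉ seen → TraceStr pred p = m
  hmono : ∀ k ∈ pred0.map Prod.fst, k ∈ pred.map Prod.fst

theorem fold_step (start p : BPos) (m : String) (seen seen' : PySem.Set BPos) (pred0 : BPred)
    (hsub : ∀ x ∈ seen, x ∈ seen') (hstartseen : start ∈ seen') (_hpseen : p ∈ seen')
    (hchild0 : p ∈ seen → ∀ mv ∈ (["R", "D", "L", "U"] : List String),
      movePos p mv ∈ seen ∨ movePos p mv ∈ pred0.map Prod.fst) :
    ∀ (mvs : List String), (∀ mv ∈ mvs, mv ∈ (["R", "D", "L", "U"] : List String)) →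
    ∀ (qa : List (BPos × String)) (qb : List BPos) (pred : BPred),
      MidInv start p m seen seen' pred0 qa qb pred →
      MidInv start p m seen seen' pred0
        (mvs.foldl (fun q mv =>
          if !(PySem.Set.contains seen' (movePos p mv)) then q ++ [(movePos p mv, m ++ mv)]
          else q) qa)
        (mvs.foldl (fun st mv =>
          if !(PySem.Set.contains seen' (movePos p mv)) then
            (st.1 ++ [movePos p mv],
             if (st.2.lookup (movePos p mv)).isNone then st.2 ++ [(movePos p mv, (p, mv))]
             else st.2)
          else st) (qb, pred)).1
        (mvs.foldl (fun st mv =>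
          if !(PySem.Set.contains seen' (movePos p mv)) then
            (st.1 ++ [movePos p mv],
             if (st.2.lookup (movePos p mv)).isNone then st.2 ++ [(movePos p mv, (p, mv))]
             else st.2)
          else st) (qb, pred)).2
      ∧ (∀ mv ∈ mvs, movePos p mv ∈ seen' ∨ movePos p mv ∈
          ((mvs.foldl (fun st mv =>
            if !(PySem.Set.contains seen' (movePos p mv)) then
              (st.1 ++ [movePos p mv],
               if (st.2.lookup (movePos p mv)).isNone then st.2 ++ [(movePos p mv, (p, mv))]
               else st.2)
            else st) (qb, pred)).2.map Prod.fst))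
      ∧ (∀ k ∈ pred.map Prod.fst, k ∈
          ((mvs.foldl (fun st mv =>
            if !(PySem.Set.contains seen' (movePos p mv)) then
              (st.1 ++ [movePos p mv],
               if (st.2.lookup (movePos p mv)).isNone then st.2 ++ [(movePos p mv, (p, mv))]
               else st.2)
            else st) (qb, pred)).2.map Prod.fst)) := by
  intro mvs
  induction mvs with
  | nil =>
    intro _ qa qb pred hinv
    exact ⟨hinv, by simp, fun k hk => hk⟩
  | cons mv mvs ih =>
    intro hmvs qa qb pred hinv
    simp only [List.foldl_cons]
    by_cases hc : PySem.Set.contains seen' (movePos p mv) = true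
    · -- already in seen': both sides leave their state unchanged
      simp only [hc, Bool.not_true, Bool.false_eq_true, if_false]
      obtain ⟨inv2, hcons, hmono2⟩ :=
        ih (fun x hx => hmvs x (List.mem_cons_of_mem _ hx)) qa qb pred hinv
      refine ⟨inv2, ?_, hmono2⟩
      intro mv' hmv'
      rcases List.mem_cons.mp hmv' with rfl | h
      · left; exact (PySem.Set.contains_iff _ _).mp hc
      · exact hcons mv' h
    · have hcf : PySem.Set.contains seen' (movePos p mv) = false := by
        cases h : PySem.Set.contains seen' (movePos p mv)
        · rfl
        · exact absurd h hc
      have hnp : movePos p mv ∉ seen' := by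
        intro hmem
        rw [(PySem.Set.contains_iff _ _).mpr hmem] at hcf
        exact Bool.noConfusion hcf
      simp only [hcf, Bool.not_false, if_true]
      cases hlk : pred.lookup (movePos p mv) with
      | some pm0 =>
        -- already recorded: queue gains a duplicate, table unchanged
        simp only [hlk, Option.isNone_some, Bool.false_eq_true, if_false]
        have hnpk : movePos p mv ∈ pred.map Prod.fst :=
          List.mem_map_of_mem (lookup_mem pred _ pm0 hlk)
        have newinv : MidInv start p m seen seen' pred0
            (qa ++ [(movePos p mv, m ++ mv)]) (qb ++ [movePos p mv]) pred := by
          refine ⟨by rw [hinv.hq, List.map_append]; rfl, hinv.hstart, hinv.hnd, hinv.hgood,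
            hinv.hpgr, ?_, ?_, ?_, hinv.hm, hinv.hmono⟩
          · intro pm hpm
            rcases List.mem_append.mp hpm with h | h
            · exact hinv.hqgr pm h
            · right; rw [List.mem_singleton.mp h]; exact hnpk
          · intro k hk
            rcases hinv.hcov k hk with h | h
            · exact Or.inl h
            · right; rw [List.map_append]; exact List.mem_append_left _ h
          · intro i pos moves hget hpos hfirst
            by_cases hilt : i < qa.length
            · rw [List.getElem?_append_left hilt] at hget
              refine hinv.htrace i pos moves hget hpos ?_
              intro j hj e hje
              exact hfirst j hj e (by rw [List.getElem?_append_left (by omega)]; exact hje)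
            · by_cases hieq : i = qa.length
              · subst hieq
                rw [List.getElem?_append_right (le_refl _)] at hget
                simp at hget
                -- pos = movePos p mv, yet movePos p mv occurs earlier in qa: contradiction
                rcases hinv.hcov _ hnpk with h | h
                · exact absurd (hget.1 ▸ h) hpos
                · obtain ⟨e, he, hke⟩ := List.mem_map.mp h
                  obtain ⟨j, hj, hje⟩ := List.mem_iff_getElem.mp he
                  exact absurd (by rw [hke, hget.1]) (hfirst j (by omega) e
                    (by rw [List.getElem?_append_left hj, List.getElem?_eq_getElem hj, hje]))
              · rw [List.getElem?_eq_none (by simp; omega)] at hget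
                exact absurd hget (by simp)
        obtain ⟨inv2, hcons, hmono2⟩ :=
          ih (fun x hx => hmvs x (List.mem_cons_of_mem _ hx)) _ _ _ newinv
        refine ⟨inv2, ?_, hmono2⟩
        intro mv' hmv'
        rcases List.mem_cons.mp hmv' with rfl | h
        · right; exact hmono2 _ hnpk
        · exact hcons mv' h
      | none =>
        -- first discovery: record the predecessor
        simp only [hlk, Option.isNone_none, if_true]
        have hnpk : movePos p mv ∉ pred.map Prod.fst := (lookup_eq_none_iff _ _).mp hlk
        have hnpstart : movePos p mv ≠ start := fun h => hnp (h ▸ hstartseen)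
        have hfresh : ∀ x ∈ ([(movePos p mv, (p, mv))] : BPred).map Prod.fst,
            x ∉ pred.map Prod.fst ∧ x ≠ start := by
          intro x hx
          rw [List.map_singleton, List.mem_singleton] at hx
          subst hx; exact ⟨hnpk, hnpstart⟩
        have hpns : p ∉ seen := by
          intro hp
          rcases hchild0 hp mv (hmvs mv List.mem_cons_self) with h | h
          · exact hnp (hsub _ h)
          · exact hnpk (hinv.hmono _ h)
        have newinv : MidInv start p m seen seen' pred0
            (qa ++ [(movePos p mv, m ++ mv)]) (qb ++ [movePos p mv])
            (pred ++ [(movePos p mv, (p, mv))]) := by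
          refine ⟨by rw [hinv.hq, List.map_append]; rfl, ?_, ?_,
            goodPred_snoc pred start _ p mv hinv.hgood hinv.hpgr, ?_, ?_, ?_, ?_, ?_, ?_⟩
          · rw [List.map_append]
            intro h
            rcases List.mem_append.mp h with h | h
            · exact hinv.hstart h
            · exact hnpstart (List.mem_singleton.mp h).symm
          · rw [List.map_append, List.map_singleton]
            refine List.Nodup.append hinv.hnd (List.nodup_singleton _) ?_
            intro a ha hb
            rw [List.mem_singleton] at hb
            subst hb
            exact hnpk ha
          · rcases hinv.hpgr with h | h
            · exact Or.inl h
            · right; rw [List.map_append]; exact List.mem_append_left _ h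
          · intro pm hpm
            rcases List.mem_append.mp hpm with h | h
            · rcases hinv.hqgr pm h with h2 | h2
              · exact Or.inl h2
              · right; rw [List.map_append]; exact List.mem_append_left _ h2
            · right
              rw [List.mem_singleton.mp h, List.map_append, List.map_singleton]
              exact List.mem_append_right _ List.mem_cons_self
          · intro k hk
            rw [List.map_append, List.mem_append, List.map_singleton, List.mem_singleton] at hk
            rcases hk with h | h
            · rcases hinv.hcov k h with h2 | h2
              · exact Or.inl h2
              · right; rw [List.map_append]; exact List.mem_append_left _ h2
            · right
              rw [h, List.map_append, List.map_singleton]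
              exact List.mem_append_right _ List.mem_cons_self
          · intro i pos moves hget hpos hfirst
            by_cases hilt : i < qa.length
            · rw [List.getElem?_append_left hilt] at hget
              have hgr := hinv.hqgr (pos, moves) (List.mem_of_getElem? hget)
              rw [TraceStr_extend pred _ start pos hfresh hinv.hnd hinv.hgood hinv.hstart hgr]
              refine hinv.htrace i pos moves hget hpos ?_
              intro j hj e hje
              exact hfirst j hj e (by rw [List.getElem?_append_left (by omega)]; exact hje)
            · by_cases hieq : i = qa.length
              · subst hieq
                rw [List.getElem?_append_right (le_refl _)] at hget
                simp at hget
                obtain ⟨h1, h2⟩ := hget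
                subst h1; subst h2
                rw [TraceStr_snoc pred start _ p mv hnpk hnpstart hinv.hnd hinv.hgood
                  hinv.hstart hinv.hpgr, hinv.hm hpns]
              · rw [List.getElem?_eq_none (by simp; omega)] at hget
                exact absurd hget (by simp)
          · intro hp
            rw [TraceStr_extend pred _ start p hfresh hinv.hnd hinv.hgood hinv.hstart hinv.hpgr]
            exact hinv.hm hp
          · intro k hk
            rw [List.map_append]
            exact List.mem_append_left _ (hinv.hmono k hk)
        obtain ⟨inv2, hcons, hmono2⟩ :=
          ih (fun x hx => hmvs x (List.mem_cons_of_mem _ hx)) _ _ _ newinv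
        refine ⟨inv2, ?_, fun k hk => hmono2 k (by rw [List.map_append]; exact List.mem_append_left _ hk)⟩
        intro mv' hmv'
        rcases List.mem_cons.mp hmv' with rfl | h
        · right
          refine hmono2 _ ?_
          rw [List.map_append, List.map_singleton]
          exact List.mem_append_right _ List.mem_cons_self
        · exact hcons mv' h



structure BfsInv (start : BPos) (goalO : Option BPos) (floorS : PySem.Set (Int × Int))
    (qa : List (BPos × String)) (seen : PySem.Set BPos) (pred : BPred) : Prop where
  hgoal : ∀ g : BPos, goalO = some g → g ∉ seen
  hstart : start ∉ pred.map Prod.fst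
  hnd : (pred.map Prod.fst).Nodup
  hgood : goodPred start pred
  hqgr : ∀ pm ∈ qa, pm.1 = start ∨ pm.1 ∈ pred.map Prod.fst
  hcov : ∀ k ∈ pred.map Prod.fst, k ∈ seen ∨ k ∈ qa.map Prod.fst
  hchild : ∀ q ∈ seen, q.all (fun x => PySem.Set.contains floorS x) = true →
    ∀ mv ∈ (["R", "D", "L", "U"] : List String),
      movePos q mv ∈ seen ∨ movePos q mv ∈ pred.map Prod.fst
  htrace : ∀ (i : Nat) (pos : BPos) (moves : String), qa[i]? = some (pos, moves) → pos ∉ seen →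
    (∀ j : Nat, j < i → ∀ e : BPos × String, qa[j]? = some e → e.1 ≠ pos) →
    TraceStr pred pos = moves
  hinit : start ∈ seen ∨ (qa = [(start, "")] ∧ seen = PySem.Set.empty ∧ pred = [])

theorem loop_eq (goalO : Option BPos) (floorS : PySem.Set (Int × Int)) :
    ∀ (f : Nat) (start : BPos) (qa : List (BPos × String)) (seen : PySem.Set BPos) (pred : BPred),
      BfsInv start goalO floorS qa seen pred →
      loopA goalO floorS f qa seen = loopB goalO floorS f (qa.map Prod.fst) seen pred := by
  intro f
  induction f with
  | zero => intro start qa seen pred _; rfl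
  | succ f ihf =>
    intro start qa seen pred hinv
    cases qa with
    | nil => rfl
    | cons hd rest =>
      obtain ⟨pos, moves⟩ := hd
      rw [List.map_cons]
      show (if some pos = goalO then some moves else _) = (if some pos = goalO then _ else _)
      by_cases hg : some pos = goalO
      · rw [if_pos hg, if_pos hg]
        have hpos : pos ∉ seen := hinv.hgoal pos hg.symm
        have := hinv.htrace 0 pos moves rfl hpos (by intro j hj e he; omega)
        rw [← this]
        rfl
      · rw [if_neg hg, if_neg hg]
        have hstartseen : start ∈ PySem.Set.add seen pos := by
          rcases hinv.hinit with h | ⟨hqa, _, _⟩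
          · exact (PySem.Set.mem_add _ _ _).mpr (Or.inl h)
          · have : pos = start := by
              have := congrArg (fun l => l.head?) hqa
              simp at this
              exact this.1
            exact (PySem.Set.mem_add _ _ _).mpr (Or.inr this.symm)
        have hposseen : pos ∈ PySem.Set.add seen pos := (PySem.Set.mem_add _ _ _).mpr (Or.inr rfl)
        have hsub : ∀ x ∈ seen, x ∈ PySem.Set.add seen pos :=
          fun x hx => (PySem.Set.mem_add _ _ _).mpr (Or.inl hx)
        have hgoal' : ∀ g : BPos, goalO = some g → g ∉ PySem.Set.add seen pos := by
          intro g hgg hmem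
          rcases (PySem.Set.mem_add _ _ _).mp hmem with h | h
          · exact hinv.hgoal g hgg h
          · exact hg (by rw [h] at hgg; exact hgg.symm)
        have htrace' : ∀ (i : Nat) (pos' : BPos) (moves' : String),
            rest[i]? = some (pos', moves') → pos' ∉ PySem.Set.add seen pos →
            (∀ j : Nat, j < i → ∀ e : BPos × String, rest[j]? = some e → e.1 ≠ pos') →
            TraceStr pred pos' = moves' := by
          intro i pos' moves' hget hpos' hfirst
          have hns : pos' ∉ seen := fun h => hpos' (hsub _ h)
          refine hinv.htrace (i + 1) pos' moves' (by rw [List.getElem?_cons_succ]; exact hget)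
            hns ?_
          intro j hj e hje
          cases j with
          | zero =>
            rw [List.getElem?_cons_zero] at hje
            have he : e = (pos, moves) := by injection hje with h; exact h.symm
            intro hcontra
            exact hpos' (by rw [← hcontra, he]; exact hposseen)
          | succ j' =>
            rw [List.getElem?_cons_succ] at hje
            exact hfirst j' (by omega) e hje
        have hqgr' : ∀ pm ∈ rest, pm.1 = start ∨ pm.1 ∈ pred.map Prod.fst :=
          fun pm hpm => hinv.hqgr pm (List.mem_cons_of_mem _ hpm)
        by_cases hfl : pos.all (fun x => PySem.Set.contains floorS x) = true
        · rw [if_pos hfl, if_pos hfl]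
          have hmid0 : MidInv start pos moves seen (PySem.Set.add seen pos) pred
              rest (rest.map Prod.fst) pred := by
            refine ⟨rfl, hinv.hstart, hinv.hnd, hinv.hgood,
              hinv.hqgr (pos, moves) List.mem_cons_self, hqgr', ?_, htrace', ?_, fun k hk => hk⟩
            · intro k hk
              rcases hinv.hcov k hk with h | h
              · exact Or.inl (hsub _ h)
              · rw [List.map_cons] at h
                rcases List.mem_cons.mp h with h2 | h2
                · exact Or.inl (h2 ▸ hposseen)
                · exact Or.inr h2
            · intro hns
              exact hinv.htrace 0 pos moves rfl hns (by intro j hj e he; omega)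
          obtain ⟨invF, hcons, hmonoK⟩ := fold_step start pos moves seen
            (PySem.Set.add seen pos) pred hsub hstartseen hposseen
            (fun hp mv hmv => hinv.hchild pos hp hfl mv hmv)
            ["R", "D", "L", "U"] (fun mv hmv => hmv) rest (rest.map Prod.fst) pred hmid0
          show loopA goalO floorS f
              (["R", "D", "L", "U"].foldl (fun q mv =>
                if !(PySem.Set.contains (PySem.Set.add seen pos) (movePos pos mv)) then
                  q ++ [(movePos pos mv, moves ++ mv)]
                else q) rest)
              (PySem.Set.add seen pos)
            = loopB goalO floorS f
              (["R", "D", "L", "U"].foldl (fun st mv =>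
                if !(PySem.Set.contains (PySem.Set.add seen pos) (movePos pos mv)) then
                  (st.1 ++ [movePos pos mv],
                   if (st.2.lookup (movePos pos mv)).isNone then
                     st.2 ++ [(movePos pos mv, (pos, mv))]
                   else st.2)
                else st) (rest.map Prod.fst, pred)).1
              (PySem.Set.add seen pos)
              (["R", "D", "L", "U"].foldl (fun st mv =>
                if !(PySem.Set.contains (PySem.Set.add seen pos) (movePos pos mv)) then
                  (st.1 ++ [movePos pos mv],
                   if (st.2.lookup (movePos pos mv)).isNone then
                     st.2 ++ [(movePos pos mv, (pos, mv))]
                   else st.2)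
                else st) (rest.map Prod.fst, pred)).2
          rw [invF.hq]
          refine ihf start _ _ _ ⟨hgoal', invF.hstart, invF.hnd, invF.hgood, invF.hqgr,
            invF.hcov, ?_, invF.htrace, Or.inl hstartseen⟩
          intro q hq hqfl mv hmv
          rcases (PySem.Set.mem_add _ _ _).mp hq with h | h
          · rcases hinv.hchild q h hqfl mv hmv with h2 | h2
            · exact Or.inl (hsub _ h2)
            · exact Or.inr (hmonoK _ h2)
          · subst h
            exact hcons mv hmv
        · rw [if_neg hfl, if_neg hfl]
          refine ihf start rest (PySem.Set.add seen pos) pred ⟨hgoal', hinv.hstart, hinv.hnd,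
            hinv.hgood, hqgr', ?_, ?_, htrace', Or.inl hstartseen⟩
          · intro k hk
            rcases hinv.hcov k hk with h | h
            · exact Or.inl (hsub _ h)
            · rw [List.map_cons] at h
              rcases List.mem_cons.mp h with h2 | h2
              · exact Or.inl (h2 ▸ hposseen)
              · exact Or.inr h2
          · intro q hq hqfl mv hmv
            rcases (PySem.Set.mem_add _ _ _).mp hq with h | h
            · rcases hinv.hchild q h hqfl mv hmv with h2 | h2
              · exact Or.inl (hsub _ h2)
              · exact Or.inr h2
            · subst h
              exact absurd hqfl hfl

-- ===== VERDICT (by name: the statement is the Claim_ definition above) =====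
theorem blox_solver_spec : Claim_equal_blox_solver := by
  intro ar _ _
  show blox_solver ar = blox_solver_alt ar
  simp only [blox_solver, blox_solver_alt]
  cases h : (scanGrid ar).2.1 with
  | none => rfl
  | some s =>
    refine loop_eq (scanGrid ar).2.2 (scanGrid ar).1 (bloxFuel ar) s [(s, "")]
      PySem.Set.empty [] ⟨?_, ?_, ?_, ?_, ?_, ?_, ?_, ?_, ?_⟩
    · intro g _ hmem; exact List.not_mem_nil hmem
    · intro hmem; simp at hmem
    · simp
    · intro i hi; simp at hi
    · intro pm hpm; left; rw [List.mem_singleton.mp hpm]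
    · intro k hk; simp at hk
    · intro q hq; exact absurd hq List.not_mem_nil
    · intro i pos moves hget _ _
      cases i with
      | zero =>
        rw [List.getElem?_cons_zero] at hget
        injection hget with h2
        have h3 : pos = s := (congrArg Prod.fst h2).symm
        have h4 : moves = "" := (congrArg Prod.snd h2).symm
        rw [h3, h4]
        rfl
      | succ n => simp at hget
    · exact Or.inr ⟨rfl, rfl, rfl⟩
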